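-- pv_equiv track=rewrite | github.com/Lujan-84/Proyecto_Integrador | Stark_00/funciones.py | minimo_segun_clave
-- ===== SOURCE A (Python) =====
-- def minimo_segun_clave(lista:list,key:str)->list:
--     """Recibe una lista de diccionarios y una clave, determina el mínimo valor en la lista en relación a
--        la clave solicitada, devuelve una lista con los personajes que tengan el mínimo valor encontrado.
--
--     Args:
--         lista (list): Lista con personajes a analizar
--         key (str): Clave en relación a la cuál se desea determinar el mínimo
--
--     Returns:
--         list: Lista con los personajes que tengan el míniimo valor de la clave recibida
--     """
--     minimo = lista[0][key]
--     for i in range(len(lista)):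
--         valor = lista[i][key]
--         if valor < minimo:
--             minimo = lista[i][key]
--
--     lista_minimos = []
--     for i in range(len(lista)):
--         personaje = lista[i]
--         valor = lista[i][key]
--         if valor == minimo:
--             lista_minimos.append(personaje)
--     return lista_minimos
-- ===== SOURCE B (Python) =====
-- def minimo_segun_clave(lista: list, key: str) -> list:
--     """Single pass: maintain the running minimum and the accumulator of
--     matching characters together; reset the accumulator on a new minimum."""
--     minimo = lista[0][key]
--     lista_minimos = []
--     for personaje in lista:
--         valor = personaje[key]
--         if valor < minimo:
--             minimo = valor
--             lista_minimos = [personaje]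
--         elif valor == minimo:
--             lista_minimos.append(personaje)
--     return lista_minimos
-- ===== Notes on version B (the rewrite author's own statement) =====
-- stated objective: alternative
-- what changed: Replaces A's two index-based passes (find the minimum, then collect the matches) by a single traversal that keeps the running minimum and the accumulator together, resetting the accumulator whenever a strictly smaller value appears.
import Mathlib
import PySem

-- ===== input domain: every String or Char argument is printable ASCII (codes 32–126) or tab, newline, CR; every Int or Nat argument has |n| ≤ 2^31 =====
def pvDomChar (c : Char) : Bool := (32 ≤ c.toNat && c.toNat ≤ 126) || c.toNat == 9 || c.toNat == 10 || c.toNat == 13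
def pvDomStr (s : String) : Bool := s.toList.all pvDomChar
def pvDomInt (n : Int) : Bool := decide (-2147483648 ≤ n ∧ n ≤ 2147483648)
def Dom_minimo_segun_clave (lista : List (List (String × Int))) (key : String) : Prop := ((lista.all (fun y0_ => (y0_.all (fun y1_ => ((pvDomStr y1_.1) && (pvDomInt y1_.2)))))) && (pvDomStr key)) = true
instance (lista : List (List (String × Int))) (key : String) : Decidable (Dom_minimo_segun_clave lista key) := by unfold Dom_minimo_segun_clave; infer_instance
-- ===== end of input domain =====

-- B fuses A's two passes (find the minimum, then collect the matches) into one
-- traversal keeping the running minimum and the accumulator together (objective: alternative).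

-- dict lookup d[key]: first match in the association list; the 0 default is never
-- reached inside Pre_ (a missing key is a Python KeyError, excluded by Pre_).
def pvLook (d : List (String × Int)) (key : String) : Int :=
  ((d.find? (fun p => p.1 == key)).map (·.2)).getD 0

-- ===== PORT A =====
-- lista[0] on an empty list is an IndexError (excluded by Pre_); headD [] stands for lista[0].
def minimo_segun_clave (lista : List (List (String × Int))) (key : String) : List (List (String × Int)) :=
  let minimo0 := pvLook (lista.headD []) key
  let minimo := lista.foldl (fun m d =>
      let valor := pvLook d key
      if valor < m then pvLook d key else m) minimo0
  lista.foldl (fun acc d =>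
      let valor := pvLook d key
      if valor == minimo then acc ++ [d] else acc) []

-- ===== PORT B =====
def minimo_segun_clave_alt (lista : List (List (String × Int))) (key : String) : List (List (String × Int)) :=
  (lista.foldl (fun (st : Int × List (List (String × Int))) p =>
      let valor := pvLook p key
      if valor < st.1 then (valor, [p])
      else if valor == st.1 then (st.1, st.2 ++ [p])
      else st)
    (pvLook (lista.headD []) key, ([] : List (List (String × Int))))).2

-- ===== PRECONDITION & SPEC =====
-- Pre_ excludes exactly the inputs where Python A raises: the empty list (IndexError
-- on lista[0]) and lists with a dict missing the key (KeyError).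
def Pre_minimo_segun_clave (lista : List (List (String × Int))) (key : String) : Prop :=
  lista ≠ [] ∧ ∀ d ∈ lista, (d.find? (fun p => p.1 == key)).isSome = true
instance (lista : List (List (String × Int))) (key : String) : Decidable (Pre_minimo_segun_clave lista key) := by unfold Pre_minimo_segun_clave; infer_instance

def pvWitness_minimo_segun_clave : (List (List (String × Int))) × String :=
  ([[("hp", 3), ("mp", 5)], [("hp", 3)], [("hp", 7)]], "hp")

def Spec_minimo_segun_clave (lista : List (List (String × Int))) (key : String) (out : List (List (String × Int))) : Prop := out = minimo_segun_clave_alt lista key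
instance (lista : List (List (String × Int))) (key : String) (out : List (List (String × Int))) : Decidable (Spec_minimo_segun_clave lista key out) := by unfold Spec_minimo_segun_clave; infer_instance

-- ===== CLAIM (what is proved, stated in full; the proofs are below) =====
def Claim_equal_minimo_segun_clave : Prop := ∀ (lista : List (List (String × Int))) (key : String), Dom_minimo_segun_clave lista key → Pre_minimo_segun_clave lista key → Spec_minimo_segun_clave lista key (minimo_segun_clave lista key)

-- ===== LEMMAS AND PROOFS =====

-- A's first loop, as a named fold (the running minimum)
def pvFmin (key : String) (xs : List (List (String × Int))) (m : Int) : Int :=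
  xs.foldl (fun m d => if pvLook d key < m then pvLook d key else m) m

theorem pvFmin_le (key : String) (xs : List (List (String × Int))) (m : Int) :
    pvFmin key xs m ≤ m := by
  induction xs generalizing m with
  | nil => simp [pvFmin]
  | cons d rest ih =>
    simp only [pvFmin, List.foldl_cons]
    split
    · exact le_of_lt (lt_of_le_of_lt (ih _) (by assumption))
    · exact ih m

-- Characterisation of B's fused fold: final min is pvFmin; the accumulator is the
-- filter of equal-valued elements, prefixed by the initial accumulator iff no reset happened.
theorem pvBfold_eq (key : String) (xs : List (List (String × Int))) (m : Int)
    (acc : List (List (String × Int))) :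
    xs.foldl (fun (st : Int × List (List (String × Int))) p =>
        let valor := pvLook p key
        if valor < st.1 then (valor, [p])
        else if valor == st.1 then (st.1, st.2 ++ [p])
        else st) (m, acc)
      = (pvFmin key xs m,
         (if pvFmin key xs m = m then acc else []) ++
           xs.filter (fun d => pvLook d key == pvFmin key xs m)) := by
  induction xs generalizing m acc with
  | nil => simp [pvFmin]
  | cons d rest ih =>
    simp only [List.foldl_cons, List.filter_cons]
    by_cases hlt : pvLook d key < m
    · have hmin : pvFmin key (d :: rest) m = pvFmin key rest (pvLook d key) := by
        simp [pvFmin, hlt]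
      rw [hmin]
      simp only [hlt, if_pos]
      rw [ih]
      have hne : pvFmin key rest (pvLook d key) ≠ m :=
        ne_of_lt (lt_of_le_of_lt (pvFmin_le key rest _) hlt)
      rw [if_neg hne]
      by_cases he : pvFmin key rest (pvLook d key) = pvLook d key
      · simp [he]
      · have : (pvLook d key == pvFmin key rest (pvLook d key)) = false := by
          simpa using fun h => he h.symm
        simp [he, this]
    · have hmin : pvFmin key (d :: rest) m = pvFmin key rest m := by
        simp [pvFmin, hlt]
      rw [hmin]
      simp only [hlt, if_false]
      by_cases heq : pvLook d key = m
      · simp only [heq, beq_self_eq_true, if_pos]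
        rw [ih]
        by_cases hm : pvFmin key rest m = m
        · have : (m == pvFmin key rest m) = true := by simp [hm]
          simp [hm]
        · have : (m == pvFmin key rest m) = false := by
            simpa using fun h => hm h.symm
          simp [hm, this]
      · have hb : (pvLook d key == m) = false := by simp [heq]
        simp only [hb]
        rw [ih]
        have hgt : m < pvLook d key := lt_of_le_of_ne (le_of_not_gt hlt) (Ne.symm heq)
        have : (pvLook d key == pvFmin key rest m) = false := by
          simpa using ne_of_gt (lt_of_le_of_lt (pvFmin_le key rest m) hgt)
        simp [this]

-- A's second loop is a filter (PySem loop-shape lemma)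
theorem pvA_eq_filter (lista : List (List (String × Int))) (key : String) :
    minimo_segun_clave lista key
      = lista.filter (fun d => pvLook d key == pvFmin key lista (pvLook (lista.headD []) key)) := by
  unfold minimo_segun_clave
  rw [PySem.List.foldl_append_if_eq_filter]
  rfl

-- ===== VERDICT (by name: the statement is the Claim_ definition above) =====
theorem minimo_segun_clave_spec : Claim_equal_minimo_segun_clave := by
  intro lista key _ _
  unfold Spec_minimo_segun_clave
  rw [pvA_eq_filter]
  unfold minimo_segun_clave_alt
  rw [pvBfold_eq]
  split <;> simp
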